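-- pv_equiv track=rewrite | github.com/YueJiang-nj/ORCSolver-CHI2020 | Code/PureBranch&Bound/flow_solver.py | horizontal_flow_connected
-- ===== SOURCE A (Python) =====
-- def horizontal_flow_connected(sublayout_width, sublayout_height, target_num_row, pref_w_list, pref_h_list):
--
--     # the total number of widgets in the sublayout
--     num = len(pref_w_list)
--
--     # the current occupied width in the row
--     row_length = 0
--
--     # total number of rows
--     num_row = 1
--
--     # use pref widths to fill rows
--     for i in range(num):
--         row_length += pref_w_list[i]
--
--         # if there is enough space for this widget with its pref width,
--         # then put this widget to this row
--         if row_length <= sublayout_width: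
--             pass
--
--         # if not enough space, then put it to the next row.
--         else:
--             row_length = pref_w_list[i]
--             num_row += 1
--
--         # if we have filled all the rows, we know how many widgets should be
--         # placed in this flow sublayout
--         if num_row == target_num_row + 1:
--
--             # widgets[:i] should be in this flow, and widgets[i:] should be in
--             # the connected flow
--             return i
--
--     # if there are not enough widgets to fill in the flow, we return the last one
--     return i
-- ===== SOURCE B (Python) =====
-- def _num_rows(width, ws):
--     # number of rows a greedy flow layout of ws needs for the given width
--     rl = 0
--     nr = 1
--     for w in ws:
--         if rl + w <= width:
--             rl += w
--         else:
--             rl = w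
--             nr += 1
--     return nr
--
--
-- def horizontal_flow_connected(sublayout_width, sublayout_height, target_num_row, pref_w_list, pref_h_list):
--     # The row count of a prefix never decreases as the prefix grows, so the
--     # first widget that no longer fits into target_num_row rows is found by
--     # binary search on the prefix length.
--     n = len(pref_w_list)
--     lo, hi = 0, n - 1
--     while lo < hi:
--         mid = (lo + hi) // 2
--         if _num_rows(sublayout_width, pref_w_list[:mid + 1]) > target_num_row:
--             hi = mid
--         else:
--             lo = mid + 1
--     if _num_rows(sublayout_width, pref_w_list[:lo + 1]) > target_num_row:
--         return lo
--     return n - 1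
-- ===== Notes on version B (the rewrite author's own statement) =====
-- stated objective: alternative
-- what changed: A streams once over the widgets with an in-loop row counter and early return; B instead binary-searches on the prefix length for the first prefix whose greedy row count (computed by a separate full row-counting helper) exceeds target_num_row, valid because the row count of a prefix is monotone in its length. Pre_ restricts to the natural domain: it excludes the empty list (A raises UnboundLocalError) and non-positive row counts target_num_row < 1, where no behaviour is specified and each search direction gives its own answer.
-- outside the precondition, e.g. on horizontal_flow_connected(5, 5, 1, [], []): A raises UnboundLocalError, B returns -1; on horizontal_flow_connected(3, 5, 0, [7, 4], [1, 1]): A returns 1, B returns 0; on horizontal_flow_connected(10, 5, -2, [3, 4], [1, 1]): A returns 1, B returns 0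
import Mathlib
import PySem

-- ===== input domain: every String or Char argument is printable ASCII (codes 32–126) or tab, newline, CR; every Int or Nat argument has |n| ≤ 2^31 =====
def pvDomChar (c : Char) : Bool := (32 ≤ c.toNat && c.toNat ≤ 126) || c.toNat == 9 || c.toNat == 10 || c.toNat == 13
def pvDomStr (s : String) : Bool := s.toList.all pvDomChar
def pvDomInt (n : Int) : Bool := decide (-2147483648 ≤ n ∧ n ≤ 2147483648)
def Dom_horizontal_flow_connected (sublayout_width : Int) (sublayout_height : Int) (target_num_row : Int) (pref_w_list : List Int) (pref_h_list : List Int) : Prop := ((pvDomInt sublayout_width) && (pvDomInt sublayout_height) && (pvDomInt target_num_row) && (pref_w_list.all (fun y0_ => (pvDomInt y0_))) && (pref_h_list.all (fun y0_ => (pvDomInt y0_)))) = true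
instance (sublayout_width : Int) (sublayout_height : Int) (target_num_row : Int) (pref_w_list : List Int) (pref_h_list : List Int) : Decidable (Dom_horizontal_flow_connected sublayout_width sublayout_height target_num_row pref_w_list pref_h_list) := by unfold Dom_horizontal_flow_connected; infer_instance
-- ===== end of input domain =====

-- B replaces A's single streaming pass (running row counter with early return) by a binary
-- search on the prefix length, using a separate helper that counts the rows a whole prefix
-- needs — objective: alternative (a different algorithm of similar cost).

-- ===== PORT A =====
-- the for-loop of A over indices, as structural recursion on the remaining widget list;
-- state (i, row_length, num_row) exactly as in the Python; on the empty list Python A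
-- raises (UnboundLocalError: i undefined) — excluded by Pre_ below
def hfcA_loop (ws : List Int) (width target i row_length num_row : Int) : Int :=
  match ws with
  | [] => i - 1
  | w :: rest =>
    if row_length + w ≤ width then
      if num_row = target + 1 then i
      else hfcA_loop rest width target (i + 1) (row_length + w) num_row
    else
      if num_row + 1 = target + 1 then i
      else hfcA_loop rest width target (i + 1) w (num_row + 1)

def horizontal_flow_connected (sublayout_width : Int) (sublayout_height : Int) (target_num_row : Int) (pref_w_list : List Int) (pref_h_list : List Int) : Int :=
  hfcA_loop pref_w_list sublayout_width target_num_row 0 0 1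

-- ===== PORT B =====
-- _num_rows of Source B: the for-loop over ws with state (rl, nr)
def hfc_num_rows_loop (ws : List Int) (width rl nr : Int) : Int :=
  match ws with
  | [] => nr
  | w :: rest =>
    if rl + w ≤ width then hfc_num_rows_loop rest width (rl + w) nr
    else hfc_num_rows_loop rest width w (nr + 1)

def hfc_num_rows (width : Int) (ws : List Int) : Int :=
  hfc_num_rows_loop ws width 0 1

-- midpoint bounds, cited by the termination proof of the while-loop below
theorem hfc_mid_bounds (lo hi : Int) (h : lo < hi) :
    lo ≤ PySem.Int.floordiv (lo + hi) 2 ∧ PySem.Int.floordiv (lo + hi) 2 < hi := by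
  rw [PySem.Int.floordiv_eq_ediv_of_pos (by omega : (0:Int) < 2)]
  omega

-- the while-loop of Source B (binary search); ws[:mid+1] is ws.take (mid+1).toNat — exact here,
-- since every call keeps 0 ≤ lo ≤ mid, so the slice bound mid+1 is nonnegative
def hfc_bsearch (ws : List Int) (width t lo hi : Int) : Int :=
  if h : lo < hi then
    let mid := PySem.Int.floordiv (lo + hi) 2
    if t < hfc_num_rows width (ws.take (mid + 1).toNat) then hfc_bsearch ws width t lo mid
    else hfc_bsearch ws width t (mid + 1) hi
  else lo
termination_by (hi - lo).toNat
decreasing_by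
  · have := hfc_mid_bounds lo hi h; omega
  · have := hfc_mid_bounds lo hi h; omega

def horizontal_flow_connected_alt (sublayout_width : Int) (sublayout_height : Int) (target_num_row : Int) (pref_w_list : List Int) (pref_h_list : List Int) : Int :=
  let n : Int := pref_w_list.length
  let lo := hfc_bsearch pref_w_list sublayout_width target_num_row 0 (n - 1)
  if target_num_row < hfc_num_rows sublayout_width (pref_w_list.take (lo + 1).toNat) then lo
  else n - 1

-- ===== PRECONDITION & SPEC =====
-- Pre_ restricts to the function's natural domain: it excludes (a) the empty widget list,
-- on which Python A raises UnboundLocalError ('i' is never bound), and (b) a non-positive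
-- row count target_num_row < 1 (a flow layout occupies at least one row, so no behaviour is
-- specified there and each search direction gives its own answer: A returns 0 or the last
-- index depending on the first widget, B returns 0).
def Pre_horizontal_flow_connected (sublayout_width : Int) (sublayout_height : Int) (target_num_row : Int) (pref_w_list : List Int) (pref_h_list : List Int) : Prop :=
  pref_w_list ≠ [] ∧ 1 ≤ target_num_row
instance (sublayout_width : Int) (sublayout_height : Int) (target_num_row : Int) (pref_w_list : List Int) (pref_h_list : List Int) : Decidable (Pre_horizontal_flow_connected sublayout_width sublayout_height target_num_row pref_w_list pref_h_list) := by unfold Pre_horizontal_flow_connected; infer_instance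

def pvWitness_horizontal_flow_connected : Int × Int × Int × List Int × List Int := (10, 5, 1, [3, 4], [1, 1])

def Spec_horizontal_flow_connected (sublayout_width : Int) (sublayout_height : Int) (target_num_row : Int) (pref_w_list : List Int) (pref_h_list : List Int) (out : Int) : Prop := out = horizontal_flow_connected_alt sublayout_width sublayout_height target_num_row pref_w_list pref_h_list
instance (sublayout_width : Int) (sublayout_height : Int) (target_num_row : Int) (pref_w_list : List Int) (pref_h_list : List Int) (out : Int) : Decidable (Spec_horizontal_flow_connected sublayout_width sublayout_height target_num_row pref_w_list pref_h_list out) := by unfold Spec_horizontal_flow_connected; infer_instance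

-- ===== CLAIM (what is proved, stated in full; the proofs are below) =====
def Claim_equal_horizontal_flow_connected : Prop := ∀ (sublayout_width : Int) (sublayout_height : Int) (target_num_row : Int) (pref_w_list : List Int) (pref_h_list : List Int), Dom_horizontal_flow_connected sublayout_width sublayout_height target_num_row pref_w_list pref_h_list → Pre_horizontal_flow_connected sublayout_width sublayout_height target_num_row pref_w_list pref_h_list → Spec_horizontal_flow_connected sublayout_width sublayout_height target_num_row pref_w_list pref_h_list (horizontal_flow_connected sublayout_width sublayout_height target_num_row pref_w_list pref_h_list)

-- ===== LEMMAS AND PROOFS =====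

-- the row counter never goes below its starting value
theorem nr_le_loop (ws : List Int) : ∀ (width rl nr : Int), nr ≤ hfc_num_rows_loop ws width rl nr := by
  induction ws with
  | nil => intro width rl nr; simp [hfc_num_rows_loop]
  | cons w rest ih =>
    intro width rl nr
    simp only [hfc_num_rows_loop]
    split
    · exact ih width (rl + w) nr
    · have := ih width w (nr + 1); omega

-- appending widgets never lowers the row count
theorem loop_append_le (a : List Int) : ∀ (b : List Int) (width rl nr : Int),
    hfc_num_rows_loop a width rl nr ≤ hfc_num_rows_loop (a ++ b) width rl nr := by
  induction a with
  | nil => intro b width rl nr; simpa [hfc_num_rows_loop] using nr_le_loop b width rl nr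
  | cons w rest ih =>
    intro b width rl nr
    simp only [hfc_num_rows_loop, List.cons_append]
    split
    · exact ih b width (rl + w) nr
    · exact ih b width w (nr + 1)

-- row counts of prefixes are monotone in the prefix length
theorem num_rows_take_mono (width : Int) (ws : List Int) {s s' : Nat} (h : s ≤ s') :
    hfc_num_rows width (ws.take s) ≤ hfc_num_rows width (ws.take s') := by
  have : ws.take s' = ws.take s ++ (ws.drop s).take (s' - s) := by
    rw [← List.take_add]
    congr 1
    omega
  rw [this]
  exact loop_append_le _ _ _ _ _

-- first index whose prefix needs more than t rows, as a recursive search (proof-only helper)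
def hfc_firstIdx (ws : List Int) (width rl nr t : Int) : Option Nat :=
  match ws with
  | [] => none
  | w :: rest =>
    if rl + w ≤ width then
      (hfc_firstIdx rest width (rl + w) nr t).map (· + 1)
    else
      if t < nr + 1 then some 0 else (hfc_firstIdx rest width w (nr + 1) t).map (· + 1)

-- A's loop returns firstIdx (shifted by i), or the last index if there is none
theorem A_loop_firstIdx (ws : List Int) : ∀ (width target i rl nr : Int), nr ≤ target →
    hfcA_loop ws width target i rl nr =
      match hfc_firstIdx ws width rl nr target with
      | some j => i + (j : Int)
      | none => i + (ws.length : Int) - 1 := by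
  induction ws with
  | nil => intro width target i rl nr h; simp [hfcA_loop, hfc_firstIdx]
  | cons w rest ih =>
    intro width target i rl nr h
    simp only [hfcA_loop, hfc_firstIdx]
    by_cases hf : rl + w ≤ width
    · rw [if_pos hf, if_pos hf, if_neg (by omega : ¬ nr = target + 1)]
      rw [ih width target (i + 1) (rl + w) nr h]
      cases hfi : hfc_firstIdx rest width (rl + w) nr target with
      | none => simp; ring
      | some j => simp; ring
    · rw [if_neg hf, if_neg hf]
      by_cases hb : nr + 1 = target + 1
      · rw [if_pos hb, if_pos (by omega : target < nr + 1)]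
        simp
      · rw [if_neg hb, if_neg (by omega : ¬ target < nr + 1)]
        rw [ih width target (i + 1) w (nr + 1) (by omega)]
        cases hfi : hfc_firstIdx rest width w (nr + 1) target with
        | none => simp; ring
        | some j => simp; ring

-- firstIdx = some j characterises exactly the prefixes needing more than t rows
theorem firstIdx_some (ws : List Int) : ∀ (width rl nr t : Int) (j : Nat), nr ≤ t →
    hfc_firstIdx ws width rl nr t = some j →
    j < ws.length ∧ ∀ m : Nat, (t < hfc_num_rows_loop (ws.take (m + 1)) width rl nr ↔ j ≤ m) := by
  induction ws with
  | nil => intro width rl nr t j h hfi; simp [hfc_firstIdx] at hfi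
  | cons w rest ih =>
    intro width rl nr t j h hfi
    simp only [hfc_firstIdx] at hfi
    by_cases hf : rl + w ≤ width
    · rw [if_pos hf] at hfi
      cases hrec : hfc_firstIdx rest width (rl + w) nr t with
      | none => rw [hrec] at hfi; simp at hfi
      | some j' =>
        rw [hrec] at hfi
        simp at hfi
        obtain ⟨hlen, hch⟩ := ih width (rl + w) nr t j' h hrec
        subst hfi
        refine ⟨by simpa using Nat.succ_lt_succ hlen, ?_⟩
        intro m
        cases m with
        | zero =>
          simp [hfc_num_rows_loop, if_pos hf]
          omega
        | succ m' =>
          simp only [List.take_succ_cons, hfc_num_rows_loop, if_pos hf]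
          rw [hch m']
          omega
    · rw [if_neg hf] at hfi
      by_cases hb : t < nr + 1
      · rw [if_pos hb] at hfi
        have hj : j = 0 := by simpa using hfi.symm
        subst hj
        refine ⟨by simp, ?_⟩
        intro m
        simp only [List.take_succ_cons, hfc_num_rows_loop, if_neg hf]
        have := nr_le_loop (rest.take m) width w (nr + 1)
        constructor
        · intro _; omega
        · intro _; omega
      · rw [if_neg hb] at hfi
        cases hrec : hfc_firstIdx rest width w (nr + 1) t with
        | none => rw [hrec] at hfi; simp at hfi
        | some j' =>
          rw [hrec] at hfi
          simp at hfi
          obtain ⟨hlen, hch⟩ := ih width w (nr + 1) t j' (by omega) hrec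
          subst hfi
          refine ⟨by simpa using Nat.succ_lt_succ hlen, ?_⟩
          intro m
          cases m with
          | zero =>
            simp [hfc_num_rows_loop, if_neg hf]
            omega
          | succ m' =>
            simp only [List.take_succ_cons, hfc_num_rows_loop, if_neg hf]
            rw [hch m']
            omega

-- firstIdx = none means no prefix needs more than t rows
theorem firstIdx_none (ws : List Int) : ∀ (width rl nr t : Int), nr ≤ t →
    hfc_firstIdx ws width rl nr t = none →
    ∀ m : Nat, hfc_num_rows_loop (ws.take m) width rl nr ≤ t := by
  induction ws with
  | nil => intro width rl nr t h _ m; simp [hfc_num_rows_loop]; omega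
  | cons w rest ih =>
    intro width rl nr t h hfi m
    simp only [hfc_firstIdx] at hfi
    by_cases hf : rl + w ≤ width
    · rw [if_pos hf] at hfi
      have hrec : hfc_firstIdx rest width (rl + w) nr t = none := by
        cases hx : hfc_firstIdx rest width (rl + w) nr t <;> simp [hx] at hfi ⊢
      cases m with
      | zero => simp [hfc_num_rows_loop]; omega
      | succ m' =>
        simp only [List.take_succ_cons, hfc_num_rows_loop, if_pos hf]
        exact ih width (rl + w) nr t h hrec m'
    · rw [if_neg hf] at hfi
      by_cases hb : t < nr + 1
      · rw [if_pos hb] at hfi; simp at hfi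
      · rw [if_neg hb] at hfi
        have hrec : hfc_firstIdx rest width w (nr + 1) t = none := by
          cases hx : hfc_firstIdx rest width w (nr + 1) t <;> simp [hx] at hfi ⊢
        cases m with
        | zero => simp [hfc_num_rows_loop]; omega
        | succ m' =>
          simp only [List.take_succ_cons, hfc_num_rows_loop, if_neg hf]
          exact ih width w (nr + 1) t (by omega) hrec m'

-- the binary-search predicate, monotone in the index
theorem p_mono (ws : List Int) (width t k k' : Int) (hkk : k ≤ k')
    (h : t < hfc_num_rows width (ws.take (k + 1).toNat)) :
    t < hfc_num_rows width (ws.take (k' + 1).toNat) := by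
  have := num_rows_take_mono width ws (show (k + 1).toNat ≤ (k' + 1).toNat by omega)
  omega

-- binary search finds the least index satisfying the (monotone) predicate
theorem bsearch_spec (ws : List Int) (width t : Int) : ∀ (n : Nat) (lo hi : Int),
    (hi - lo).toNat ≤ n → lo ≤ hi →
    lo ≤ hfc_bsearch ws width t lo hi ∧ hfc_bsearch ws width t lo hi ≤ hi ∧
    (∀ k, lo ≤ k → k < hfc_bsearch ws width t lo hi → ¬ t < hfc_num_rows width (ws.take (k + 1).toNat)) ∧
    ((∃ k, lo ≤ k ∧ k ≤ hi ∧ t < hfc_num_rows width (ws.take (k + 1).toNat)) →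
      t < hfc_num_rows width (ws.take (hfc_bsearch ws width t lo hi + 1).toNat)) := by
  intro n
  induction n with
  | zero =>
    intro lo hi hfuel hle
    have heq : lo = hi := by omega
    subst heq
    rw [hfc_bsearch]
    simp only [lt_irrefl, dite_false]
    refine ⟨le_rfl, le_rfl, fun k h1 h2 => by omega, ?_⟩
    rintro ⟨k, h1, h2, h3⟩
    have : k = lo := by omega
    subst this
    exact h3
  | succ n ih =>
    intro lo hi hfuel hle
    by_cases hlt : lo < hi
    · obtain ⟨hm1, hm2⟩ := hfc_mid_bounds lo hi hlt
      rw [hfc_bsearch]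
      rw [dif_pos hlt]
      set mid := PySem.Int.floordiv (lo + hi) 2 with hmid
      by_cases hp : t < hfc_num_rows width (ws.take (mid + 1).toNat)
      · rw [if_pos hp]
        obtain ⟨r1, r2, r3, r4⟩ := ih lo mid (by omega) (by omega)
        refine ⟨r1, by omega, r3, fun _ => r4 ⟨mid, by omega, by omega, hp⟩⟩
      · rw [if_neg hp]
        obtain ⟨r1, r2, r3, r4⟩ := ih (mid + 1) hi (by omega) (by omega)
        refine ⟨by omega, r2, ?_, ?_⟩
        · intro k hk1 hk2
          by_cases hkm : k ≤ mid
          · intro hpk; exact hp (p_mono ws width t k mid hkm hpk)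
          · exact r3 k (by omega) hk2
        · rintro ⟨k, h1, h2, h3⟩
          have hkm : mid + 1 ≤ k := by
            by_contra hc
            exact hp (p_mono ws width t k mid (by omega) h3)
          exact r4 ⟨k, hkm, h2, h3⟩
    · have heq : lo = hi := by omega
      subst heq
      rw [hfc_bsearch]
      simp only [lt_irrefl, dite_false]
      refine ⟨le_rfl, le_rfl, fun k h1 h2 => by omega, ?_⟩
      rintro ⟨k, h1, h2, h3⟩
      have : k = lo := by omega
      subst this
      exact h3

-- ===== VERDICT (by name: the statement is the Claim_ definition above) =====
theorem horizontal_flow_connected_spec : Claim_equal_horizontal_flow_connected := by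
  intro width h t ws ph _ hpre
  obtain ⟨hne, ht⟩ := hpre
  unfold Spec_horizontal_flow_connected horizontal_flow_connected horizontal_flow_connected_alt
  have hn : 1 ≤ ws.length := List.length_pos_of_ne_nil hne
  have hA := A_loop_firstIdx ws width t 0 0 1 ht
  obtain ⟨r1, r2, r3, r4⟩ :=
    bsearch_spec ws width t ((ws.length : Int) - 1 - 0).toNat 0 ((ws.length : Int) - 1)
      le_rfl (by omega)
  set r := hfc_bsearch ws width t 0 ((ws.length : Int) - 1) with hr
  cases hfi : hfc_firstIdx ws width 0 1 t with
  | some j =>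
    obtain ⟨hjlen, hch⟩ := firstIdx_some ws width 0 1 t j ht hfi
    -- p k ↔ j ≤ k for 0 ≤ k
    have hpk : ∀ k : Int, 0 ≤ k →
        (t < hfc_num_rows width (ws.take (k + 1).toNat) ↔ (j : Int) ≤ k) := by
      intro k hk
      have h1 : (k + 1).toNat = k.toNat + 1 := by omega
      rw [h1]
      unfold hfc_num_rows
      rw [hch k.toNat]
      omega
    have hpj : t < hfc_num_rows width (ws.take ((j : Int) + 1).toNat) :=
      (hpk (j : Int) (by omega)).mpr le_rfl
    have hpr : t < hfc_num_rows width (ws.take (r + 1).toNat) :=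
      r4 ⟨(j : Int), by omega, by omega, hpj⟩
    have hjr : (j : Int) ≤ r := (hpk r (by omega)).mp hpr
    have hrj : r ≤ (j : Int) := by
      by_contra hc
      exact r3 (j : Int) (by omega) (by omega) hpj
    rw [hA, hfi]
    simp only [zero_add]
    rw [if_pos hpr]
    omega
  | none =>
    have hnone := firstIdx_none ws width 0 1 t ht hfi
    have hnp : ¬ t < hfc_num_rows width (ws.take (r + 1).toNat) := by
      have := hnone (r + 1).toNat
      unfold hfc_num_rows
      omega
    rw [hA, hfi]
    simp only [zero_add]
    rw [if_neg hnp]
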